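-- pv_equiv track=rewrite | github.com/jeongYuri/coding-test-solution | 프로그래머스/2/60057. 문자열 압축/문자열 압축.py | solution
-- ===== SOURCE A (Python) =====
-- def solution(s):
--     answer = len(s)
--
--     for step in range(1,len(s)//2+1):
--         compressed = ''
--         prev = s[:step] #step 만큼 쪼개면서 가야지...
--         cnt = 1
--
--         for i in range(step, len(s),step):
--             if s[i:i+step]==prev:
--                 cnt +=1
--             else:
--                 compressed += str(cnt)+prev if cnt>1 else prev
--                 prev = s[i:i+step]
--                 cnt =1
--         compressed += str(cnt) + prev if cnt>1 else prev
--         answer = min(answer, len(compressed))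
--     return answer
-- ===== SOURCE B (Python) =====
-- def solution(s):
--     n = len(s)
--     best = n
--     for step in range(1, n // 2 + 1):
--         # e[i] = longest common extension of s[i:] and s[i+step:], built right to left
--         e = [0] * (n + 1)
--         for i in range(n - step - 1, -1, -1):
--             e[i] = e[i + 1] + 1 if s[i] == s[i + step] else 0
--         total = 0
--         i = 0
--         while i < n:
--             run = e[i] // step + 1      # O(1) run length from the extension array
--             total += (len(str(run)) if run > 1 else 0) + min(step, n - i)
--             i += run * step
--         best = min(best, total)
--     return best
-- ===== Notes on version B (the rewrite author's own statement) =====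
-- stated objective: alternative
-- what changed: B replaces A's repeated block-slice comparisons and run-length-encoding string building by a longest-common-extension array e (e[i] = match length of s[i:] vs s[i+step:], built right-to-left per step), from which each run length is read off in O(1) as e[i]//step+1 and the scan jumps run-by-run summing lengths arithmetically.
import Mathlib
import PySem

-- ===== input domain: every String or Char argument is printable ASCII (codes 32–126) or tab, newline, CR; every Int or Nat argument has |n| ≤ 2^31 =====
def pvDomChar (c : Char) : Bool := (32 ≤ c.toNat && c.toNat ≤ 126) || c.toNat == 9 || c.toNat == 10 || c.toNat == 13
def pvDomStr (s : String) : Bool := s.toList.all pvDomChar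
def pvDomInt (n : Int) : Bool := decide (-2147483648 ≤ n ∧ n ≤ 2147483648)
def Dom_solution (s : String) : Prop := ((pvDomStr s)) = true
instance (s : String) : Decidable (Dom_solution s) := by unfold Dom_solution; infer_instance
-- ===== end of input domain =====

-- B replaces A's repeated block-slice comparisons and compressed-string building by a per-step
-- longest-common-extension array (e[i] = match length of s[i:] vs s[i+step:], built right to
-- left), from which each run length is read in O(1) as e[i]//step+1 and the scan jumps run by
-- run summing lengths arithmetically; objective: alternative (same asymptotic cost).

-- ===== PORT A =====
-- literal transliteration of A: for each step, one stateful pass over the cut positions,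
-- concatenating count-prefixed blocks into `compressed`, then min of its length.
def solution (s : String) : Int :=
  let cs := s.toList
  let n : Int := PySem.Str.len s
  (PySem.List.pyRange 1 (PySem.Int.floordiv n 2 + 1) 1).foldl (fun answer step =>
    let st := (PySem.List.pyRange step n step).foldl
      (fun (acc : List Char × List Char × Int) i =>
        if PySem.List.slice cs (some i) (some (i + step)) == acc.2.1 then
          (acc.1, acc.2.1, acc.2.2 + 1)
        else
          (acc.1 ++ (if acc.2.2 > 1 then PySem.Int.toChars acc.2.2 ++ acc.2.1 else acc.2.1),
           PySem.List.slice cs (some i) (some (i + step)), 1))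
      (([] : List Char), PySem.List.slice cs none (some step), (1 : Int))
    let compressed := st.1 ++ (if st.2.2 > 1 then PySem.Int.toChars st.2.2 ++ st.2.1 else st.2.1)
    min answer (compressed.length : Int)) n

-- ===== PORT B =====
-- literal transliteration of B (Source B).
-- the build loop `for i in range(n-step-1, -1, -1)` visits i = n-step-1, …, 0, i.e. exactly
-- (List.range (n-step)).reverse; s[i] and s[i+step] are in range there, so getD is exact.
def pvBuild (cs : List Char) (n step : Nat) : List Nat :=
  ((List.range (n - step)).reverse).foldl
    (fun ev i => ev.set i (if cs.getD i ' ' == cs.getD (i + step) ' ' then ev.getD (i + 1) 0 + 1 else 0))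
    (List.replicate (n + 1) 0)

-- the `while i < n` loop of Source B; e holds the (nonnegative) Python ints of Source B's list e
def pvBScan (e : List Nat) (n step : Nat) (hstep : 0 < step) (i : Nat) (total : Int) : Int :=
  if i < n then
    let run := e.getD i 0 / step + 1
    pvBScan e n step hstep (i + run * step)
      (total + ((if run > 1 then ((PySem.Int.toChars (run : Int)).length : Int) else 0)
        + ((min step (n - i) : Nat) : Int)))
  else total
termination_by n - i
decreasing_by
  have h1 : step ≤ (e.getD i 0 / step + 1) * step := Nat.le_mul_of_pos_left step (Nat.succ_pos _)
  omega

def solution_alt (s : String) : Int :=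
  let cs := s.toList
  let n := cs.length
  (List.range (n / 2)).foldl (fun best k =>
    let step := k + 1
    let e := pvBuild cs n step
    min best (pvBScan e n step (Nat.succ_pos k) 0 0)) (n : Int)

-- ===== PRECONDITION & SPEC =====
def Spec_solution (s : String) (out : Int) : Prop := out = solution_alt s
instance (s : String) (out : Int) : Decidable (Spec_solution s out) := by unfold Spec_solution; infer_instance

-- ===== CLAIM (what is proved, stated in full; the proofs are below) =====
def Claim_equal_solution : Prop := ∀ (s : String), Dom_solution s → Spec_solution s (solution s)

-- ===== LEMMAS AND PROOFS =====

-- getD after set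
theorem pv_getD_set (l : List Nat) (m j v : Nat) (hm : m < l.length) :
    (l.set m v).getD j 0 = if j = m then v else l.getD j 0 := by
  by_cases h : j = m
  · subst h; simp [List.getD, hm]
  · simp [List.getD, List.getElem?_set_ne (by omega : m ≠ j), h]

-- specification of the extension array: longest common extension of cs[i:] and cs[i+step:]
def pvExt (cs : List Char) (step : Nat) (i : Nat) : Nat :=
  if i + step < cs.length then
    (if cs.getD i ' ' == cs.getD (i + step) ' ' then pvExt cs step (i + 1) + 1 else 0)
  else 0
termination_by cs.length - i
decreasing_by omega

theorem pv_ext_zero (cs : List Char) (step i : Nat) (h : ¬ i + step < cs.length) :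
    pvExt cs step i = 0 := by rw [pvExt]; simp [h]

theorem pv_ext_pos (cs : List Char) (step i : Nat) (h : 0 < pvExt cs step i) :
    i + step < cs.length ∧ (cs.getD i ' ' == cs.getD (i + step) ' ') = true ∧
      pvExt cs step i = pvExt cs step (i + 1) + 1 := by
  by_cases hb : i + step < cs.length
  · by_cases hc : (cs.getD i ' ' == cs.getD (i + step) ' ') = true
    · refine ⟨hb, hc, ?_⟩
      conv_lhs => rw [pvExt]
      rw [if_pos hb, if_pos hc]
    · exfalso; rw [pvExt, if_pos hb, if_neg hc] at h; omega
  · exfalso; rw [pvExt, if_neg hb] at h; omega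

-- ext is the run length of consecutive matches: shifting inside the run subtracts
theorem pv_ext_shift (cs : List Char) (step : Nat) :
    ∀ (k i : Nat), k ≤ pvExt cs step i → pvExt cs step (i + k) = pvExt cs step i - k := by
  intro k
  induction k with
  | zero => intro i _; simp
  | succ m ih =>
      intro i hk
      have hpos : 0 < pvExt cs step i := by omega
      obtain ⟨_, _, heq⟩ := pv_ext_pos cs step i hpos
      have h2 : pvExt cs step ((i + 1) + m) = pvExt cs step (i + 1) - m := ih (i + 1) (by omega)
      have harr : i + (m + 1) = (i + 1) + m := by omega
      rw [harr, h2]; omega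

theorem pv_ext_ge_iff (cs : List Char) (step : Nat) :
    ∀ (k i : Nat), k ≤ pvExt cs step i ↔
      (∀ j, j < k → i + j + step < cs.length ∧ cs.getD (i + j) ' ' = cs.getD (i + j + step) ' ') := by
  intro k
  induction k with
  | zero => intro i; simp
  | succ m ih =>
      intro i
      constructor
      · intro hk j hj
        have hpos : 0 < pvExt cs step i := by omega
        obtain ⟨hb, hc, heq⟩ := pv_ext_pos cs step i hpos
        rcases Nat.eq_zero_or_pos j with h0 | h0
        · subst h0; exact ⟨by simpa using hb, by simpa using eq_of_beq hc⟩
        · obtain ⟨j', rfl⟩ : ∃ j', j = j' + 1 := ⟨j - 1, by omega⟩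
          have hmem := ((ih (i + 1)).mp (by omega)) j' (by omega)
          constructor
          · have := hmem.1; omega
          · have h2 := hmem.2
            have e1 : i + (j' + 1) = i + 1 + j' := by omega
            rw [e1]; exact h2
      · intro hall
        have h0 := hall 0 (by omega)
        have hb : i + step < cs.length := by have := h0.1; omega
        have hc : (cs.getD i ' ' == cs.getD (i + step) ' ') = true := by
          exact beq_iff_eq.mpr (by simpa using h0.2)
        have hm : m ≤ pvExt cs step (i + 1) := by
          refine (ih (i + 1)).mpr ?_
          intro j hj
          have hmem := hall (j + 1) (by omega)
          constructor
          · have := hmem.1; omega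
          · have h2 := hmem.2
            have e1 : i + (j + 1) = i + 1 + j := by omega
            rw [e1] at h2; exact h2
        have hunf : pvExt cs step i = pvExt cs step (i + 1) + 1 := by
          conv_lhs => rw [pvExt]
          rw [if_pos hb, if_pos hc]
        omega

theorem pv_ext_bound (cs : List Char) (step i : Nat) :
    pvExt cs step i = 0 ∨ i + pvExt cs step i + step ≤ cs.length := by
  rcases Nat.eq_zero_or_pos (pvExt cs step i) with h | h
  · exact Or.inl h
  · right
    have hmem := ((pv_ext_ge_iff cs step (pvExt cs step i) i).mp le_rfl) (pvExt cs step i - 1) (by omega)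
    have := hmem.1; omega

-- the built array agrees with pvExt everywhere
theorem pv_build_inv (cs : List Char) (step : Nat) :
    ∀ (m : Nat) (e : List Nat), e.length = cs.length + 1 → m ≤ cs.length - step →
      (∀ j, m ≤ j → e.getD j 0 = pvExt cs step j) →
      ∀ j, (((List.range m).reverse).foldl
        (fun ev i => ev.set i (if cs.getD i ' ' == cs.getD (i + step) ' ' then ev.getD (i + 1) 0 + 1 else 0)) e).getD j 0
        = pvExt cs step j := by
  intro m
  induction m with
  | zero => intro e hlen hms hinv j; simpa using hinv j (Nat.zero_le j)
  | succ m ih =>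
      intro e hlen hms hinv j
      rw [List.range_succ, List.reverse_append, List.reverse_singleton, List.singleton_append,
        List.foldl_cons]
      apply ih
      · simp [hlen]
      · omega
      · intro j' hj'
        have hmlt : m < e.length := by omega
        rw [pv_getD_set e m j' _ hmlt]
        by_cases hjm : j' = m
        · subst hjm
          have hb : j' + step < cs.length := by omega
          have hnext : e.getD (j' + 1) 0 = pvExt cs step (j' + 1) := hinv (j' + 1) (by omega)
          rw [if_pos rfl, hnext]
          conv_rhs => rw [pvExt]
          rw [if_pos hb]
        · rw [if_neg hjm]
          exact hinv j' (by omega)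

theorem pv_build_getD (cs : List Char) (step : Nat) :
    ∀ j, (pvBuild cs cs.length step).getD j 0 = pvExt cs step j := by
  intro j
  unfold pvBuild
  apply pv_build_inv cs step (cs.length - step) (List.replicate (cs.length + 1) 0)
  · simp
  · omega
  · intro j' hj'
    have hz : pvExt cs step j' = 0 := pv_ext_zero cs step j' (by omega)
    rw [hz]
    simp only [List.getD, List.getElem?_replicate]
    split <;> rfl

-- grouped compressed length of the remaining blocks, given the current run block `prev`
-- repeated `cnt` times so far (the characterisation A's inner loop reduces to)
def pvG : List (List Char) → List Char → Int → Int
  | [], prev, cnt =>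
      (((if cnt > 1 then PySem.Int.toChars cnt ++ prev else prev) : List Char).length : Int)
  | b :: bs, prev, cnt =>
      if b == prev then pvG bs prev (cnt + 1)
      else (((if cnt > 1 then PySem.Int.toChars cnt ++ prev else prev) : List Char).length : Int)
           + pvG bs b 1

-- A's inner loop (already mapped to the block list) measures pvG
theorem pv_A_inner (bs : List (List Char)) : ∀ (c prev : List Char) (cnt : Int),
    (let st := bs.foldl (fun (acc : List Char × List Char × Int) b =>
        if b == acc.2.1 then (acc.1, acc.2.1, acc.2.2 + 1)
        else (acc.1 ++ (if acc.2.2 > 1 then PySem.Int.toChars acc.2.2 ++ acc.2.1 else acc.2.1), b, 1))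
        (c, prev, cnt)
     (((st.1 ++ (if st.2.2 > 1 then PySem.Int.toChars st.2.2 ++ st.2.1 else st.2.1)).length : Int)))
    = (c.length : Int) + pvG bs prev cnt := by
  induction bs with
  | nil =>
      intro c prev cnt
      simp [pvG, List.length_append]
  | cons b bs ih =>
      intro c prev cnt
      simp only [List.foldl_cons]
      by_cases h : (b == prev) = true
      · simp only [pvG, h, if_pos]
        exact ih c prev (cnt + 1)
      · simp only [pvG, h, Bool.false_eq_true, if_false]
        have := ih (c ++ (if cnt > 1 then PySem.Int.toChars cnt ++ prev else prev)) b 1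
        simp only at this ⊢
        rw [this]
        simp [List.length_append]
        ring

-- range(a, n, step) starts with a and continues at a+step, for 0 < step, a < n
theorem pv_pyRange_cons (a n step : Int) (hst : 0 < step) (h : a < n) :
    PySem.List.pyRange a n step = a :: PySem.List.pyRange (a + step) n step := by
  rw [PySem.List.pyRange_of_pos a n hst, PySem.List.pyRange_of_pos (a + step) n hst]
  have hdiv : (n - a + step - 1) / step = (n - a - 1) / step + 1 := by
    have h1 : n - a + step - 1 = (n - a - 1) + 1 * step := by ring
    rw [h1, Int.add_mul_ediv_right _ _ (by omega : step ≠ 0)]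
  by_cases hlt : a + step < n
  · have h2 : n - (a + step) + step - 1 = n - a - 1 := by ring
    simp only [h, if_pos, hlt, h2, hdiv]
    have hnn : 0 ≤ (n - a - 1) / step := Int.ediv_nonneg (by omega) (by omega)
    have h3 : ((n - a - 1) / step + 1).toNat = ((n - a - 1) / step).toNat + 1 := by omega
    rw [h3, List.range_succ_eq_map, List.map_cons, List.map_map]
    refine List.cons_eq_cons.mpr ⟨by simp, ?_⟩
    exact List.map_congr_left (fun k _ => by
      simp only [Function.comp_apply, Nat.succ_eq_add_one]
      push_cast
      ring)
  · have hz : (n - a - 1) / step = 0 := Int.ediv_eq_zero_of_lt (by omega) (by omega)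
    simp only [h, if_pos, hlt, hdiv, hz]
    norm_num

-- the block list s[j:j+step], s[j+step:j+2step], … as A slices it
def pvBlocks (cs : List Char) (step j : Nat) : List (List Char) :=
  (PySem.List.pyRange (j : Int) (cs.length : Int) (step : Int)).map
    (fun ii => PySem.List.slice cs (some ii) (some (ii + (step : Int))))

theorem pv_blocks_nil (cs : List Char) (step j : Nat) (hstep : 0 < step) (h : cs.length ≤ j) :
    pvBlocks cs step j = [] := by
  unfold pvBlocks
  rw [PySem.List.pyRange_of_pos _ _ (by exact_mod_cast hstep : (0:Int) < (step:Int))]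
  have hnot : ¬ ((j : Int) < (cs.length : Int)) := by exact_mod_cast not_lt.mpr h
  simp [hnot]

theorem pv_blocks_cons (cs : List Char) (step j : Nat) (hstep : 0 < step) (hj : j < cs.length) :
    pvBlocks cs step j = (cs.drop j).take step :: pvBlocks cs step (j + step) := by
  unfold pvBlocks
  have h1 : ((j : Nat) : Int) < ((cs.length : Nat) : Int) := by exact_mod_cast hj
  rw [pv_pyRange_cons _ _ _ (by exact_mod_cast hstep) h1, List.map_cons]
  refine List.cons_eq_cons.mpr ⟨PySem.List.slice_natCast_add cs j step, ?_⟩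
  congr 1

theorem pv_getElem?_drop_take (cs : List Char) (a b t : Nat) (ht : t < b) :
    ((cs.drop a).take b)[t]? = cs[a + t]? := by
  rw [List.getElem?_take_of_lt ht, List.getElem?_drop]

-- adjacent blocks are equal iff the extension spans a block
theorem pv_blk_eq_iff (cs : List Char) (step i : Nat) (hstep : 0 < step)
    (h : i + step < cs.length) :
    ((cs.drop (i + step)).take step = (cs.drop i).take step) ↔ step ≤ pvExt cs step i := by
  constructor
  · intro heq
    have hlen := congrArg List.length heq
    simp only [List.length_take, List.length_drop] at hlen
    have hfull : i + 2 * step ≤ cs.length := by omega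
    refine (pv_ext_ge_iff cs step step i).mpr ?_
    intro t ht
    refine ⟨by omega, ?_⟩
    have h1 : ((cs.drop (i + step)).take step)[t]? = cs[i + step + t]? :=
      pv_getElem?_drop_take _ _ _ _ ht
    have h2 : ((cs.drop i).take step)[t]? = cs[i + t]? := pv_getElem?_drop_take _ _ _ _ ht
    have h3 := congrArg (fun l => l[t]?) heq
    simp only at h3
    rw [h1, h2] at h3
    have e1 : i + t + step = i + step + t := by omega
    simp [List.getD, e1, h3]
  · intro hge
    have hall := (pv_ext_ge_iff cs step step i).mp hge
    have hfull : i + 2 * step ≤ cs.length := by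
      have := (hall (step - 1) (by omega)).1; omega
    apply List.ext_getElem?
    intro t
    by_cases ht : t < step
    · rw [pv_getElem?_drop_take _ _ _ _ ht, pv_getElem?_drop_take _ _ _ _ ht]
      have hc := (hall t ht).2
      have hi1 : i + t < cs.length := by omega
      have hi2 : i + step + t < cs.length := by omega
      have e1 : i + t + step = i + step + t := by omega
      rw [e1] at hc
      simp only [List.getD, List.getElem?_eq_getElem hi1, List.getElem?_eq_getElem hi2,
        Option.getD_some] at hc
      rw [List.getElem?_eq_getElem hi1, List.getElem?_eq_getElem hi2, hc]
    · have hl1 : ((cs.drop (i + step)).take step).length ≤ t := by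
        simp only [List.length_take, List.length_drop]; omega
      have hl2 : ((cs.drop i).take step).length ≤ t := by
        simp only [List.length_take, List.length_drop]; omega
      rw [List.getElem?_eq_none hl1, List.getElem?_eq_none hl2]

-- length of a count-prefixed block
theorem pv_enc_len (c : Int) (prev : List Char) :
    (((if c > 1 then PySem.Int.toChars c ++ prev else prev) : List Char).length : Int)
      = (if c > 1 then ((PySem.Int.toChars c).length : Int) else 0) + (prev.length : Int) := by
  by_cases h : c > 1
  · simp only [h, if_pos, List.length_append]; push_cast; ring
  · simp [h]

theorem pv_div_sub (a step : Nat) (h : step ≤ a) (hs : 0 < step) :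
    (a - step) / step + 1 = a / step := by
  have h1 := Nat.add_div_right (a - step) hs
  rw [Nat.sub_add_cancel h] at h1
  omega

-- the common per-step grouped-length recursion (B's scan computes it; A's pvG reduces to it)
def pvGL (cs : List Char) (step : Nat) (hstep : 0 < step) (i : Nat) : Int :=
  if i < cs.length then
    (if pvExt cs step i / step + 1 > 1
       then ((PySem.Int.toChars ((pvExt cs step i / step + 1 : Nat) : Int)).length : Int) else 0)
    + ((min step (cs.length - i) : Nat) : Int)
    + pvGL cs step hstep (i + (pvExt cs step i / step + 1) * step)
  else 0
termination_by cs.length - i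
decreasing_by
  have h1 : step ≤ (pvExt cs step i / step + 1) * step := Nat.le_mul_of_pos_left step (Nat.succ_pos _)
  omega

-- B's scan computes pvGL
theorem pv_scan_eq (cs : List Char) (step : Nat) (h : 0 < step) :
    ∀ (fuel i : Nat) (t : Int), cs.length - i ≤ fuel →
      pvBScan (pvBuild cs cs.length step) cs.length step h i t = t + pvGL cs step h i := by
  intro fuel
  induction fuel with
  | zero =>
      intro i t hf
      have hni : ¬ i < cs.length := by omega
      rw [pvBScan, pvGL]
      simp [hni]
  | succ f ih =>
      intro i t hf
      rw [pvBScan, pvGL]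
      by_cases hi : i < cs.length
      · simp only [hi, if_pos, pv_build_getD cs step i]
        rw [ih _ _ (by
          have h1 : step ≤ (pvExt cs step i / step + 1) * step :=
            Nat.le_mul_of_pos_left step (Nat.succ_pos _)
          omega)]
        ring
      · simp [hi]

-- A's grouped pass over the blocks from i, with the current run open, reduces to one run step
theorem pv_AG (cs : List Char) (step : Nat) (hstep : 0 < step) :
    ∀ (fuel : Nat), ∀ (i : Nat) (c : Int), cs.length - i ≤ fuel → i < cs.length → 1 ≤ c →
      pvG (pvBlocks cs step (i + step)) ((cs.drop i).take step) c
        = (if c + ((pvExt cs step i / step : Nat) : Int) > 1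
             then ((PySem.Int.toChars (c + ((pvExt cs step i / step : Nat) : Int))).length : Int)
             else 0)
          + ((min step (cs.length - i) : Nat) : Int)
          + (if i + (pvExt cs step i / step + 1) * step < cs.length
               then pvG (pvBlocks cs step (i + (pvExt cs step i / step + 1) * step + step))
                      ((cs.drop (i + (pvExt cs step i / step + 1) * step)).take step) 1
               else 0) := by
  intro fuel
  induction fuel with
  | zero => intro i c hf hi hc; omega
  | succ f ih =>
      intro i c hf hi hc
      by_cases hnext : i + step < cs.length
      · rw [pv_blocks_cons cs step (i + step) hstep hnext]
        by_cases hrun : step ≤ pvExt cs step i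
        · -- the next block continues the run
          have heq : (cs.drop (i + step)).take step = (cs.drop i).take step :=
            (pv_blk_eq_iff cs step i hstep hnext).mpr hrun
          have hbeq : ((cs.drop (i + step)).take step == (cs.drop i).take step) = true :=
            beq_iff_eq.mpr heq
          have hG : pvG ((cs.drop (i + step)).take step :: pvBlocks cs step (i + step + step))
              ((cs.drop i).take step) c
              = pvG (pvBlocks cs step (i + step + step)) ((cs.drop i).take step) (c + 1) := by
            simp [pvG, hbeq]
          rw [hG, ← heq]
          have hbound : i + pvExt cs step i + step ≤ cs.length := by
            rcases pv_ext_bound cs step i with h0 | h0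
            · omega
            · exact h0
          have h2s : i + 2 * step ≤ cs.length := by omega
          rw [ih (i + step) (c + 1) (by omega) (by omega) (by omega)]
          have hshift : pvExt cs step (i + step) = pvExt cs step i - step :=
            pv_ext_shift cs step step i hrun
          have hr' : pvExt cs step (i + step) / step + 1 = pvExt cs step i / step := by
            rw [hshift]; exact pv_div_sub _ _ hrun hstep
          have hc1 : (c + 1) + ((pvExt cs step (i + step) / step : Nat) : Int)
              = c + ((pvExt cs step i / step : Nat) : Int) := by
            have := hr'; omega
          have hidx : i + step + (pvExt cs step (i + step) / step + 1) * step
              = i + (pvExt cs step i / step + 1) * step := by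
            rw [hr']
            have hrpos : 1 ≤ pvExt cs step i / step := (Nat.one_le_div_iff hstep).mpr hrun
            cases Nat.exists_eq_add_of_le hrpos with
            | intro r hr => rw [hr]; ring
          have hmin1 : min step (cs.length - (i + step)) = step := by omega
          have hmin2 : min step (cs.length - i) = step := by omega
          rw [hc1, hidx, hmin1, hmin2]
        · -- the next block would start a new run (blocks differ)
          have hneq : ((cs.drop (i + step)).take step == (cs.drop i).take step) = false := by
            rw [beq_eq_false_iff_ne]
            intro heq
            exact hrun ((pv_blk_eq_iff cs step i hstep hnext).mp heq)
          have hr0 : pvExt cs step i / step = 0 := Nat.div_eq_of_lt (by omega)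
          have hG : pvG ((cs.drop (i + step)).take step :: pvBlocks cs step (i + step + step))
              ((cs.drop i).take step) c
              = (((if c > 1 then PySem.Int.toChars c ++ (cs.drop i).take step
                    else (cs.drop i).take step) : List Char).length : Int)
                + pvG (pvBlocks cs step (i + step + step)) ((cs.drop (i + step)).take step) 1 := by
            simp [pvG, hneq]
          rw [hG, pv_enc_len, hr0]
          simp only [Nat.cast_zero, add_zero, zero_add, one_mul, hnext, if_pos]
          have hlen : (((cs.drop i).take step).length : Int) = ((min step (cs.length - i) : Nat) : Int) := by
            simp [List.length_take, List.length_drop]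
          rw [hlen]
      · -- no further blocks
        rw [pv_blocks_nil cs step (i + step) hstep (by omega)]
        have hz : pvExt cs step i = 0 := pv_ext_zero cs step i (by omega)
        simp only [pvG, hz, Nat.zero_div, Nat.cast_zero, add_zero]
        rw [pv_enc_len]
        have hlen : (((cs.drop i).take step).length : Int) = ((min step (cs.length - i) : Nat) : Int) := by
          simp [List.length_take, List.length_drop]
        rw [hlen]
        simp [hnext]

-- A's grouped pass equals pvGL
theorem pv_A_eq_GL (cs : List Char) (step : Nat) (hstep : 0 < step) :
    ∀ (fuel i : Nat), cs.length - i ≤ fuel → i < cs.length →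
      pvG (pvBlocks cs step (i + step)) ((cs.drop i).take step) 1 = pvGL cs step hstep i := by
  intro fuel
  induction fuel with
  | zero => intro i hf hi; omega
  | succ f ih =>
      intro i hf hi
      rw [pvGL]
      simp only [hi, if_pos]
      rw [pv_AG cs step hstep (f + 1) i 1 hf hi le_rfl]
      congr 1
      · congr 1
        rcases Nat.eq_zero_or_pos (pvExt cs step i / step) with h0 | h0
        · simp [h0]
        · have hcast : (0:Int) < ((pvExt cs step i / step : Nat) : Int) := by exact_mod_cast h0
          have c1 : (1:Int) + ((pvExt cs step i / step : Nat) : Int) > 1 := by omega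
          have c2 : pvExt cs step i / step + 1 > 1 := by omega
          simp only [c1, c2, if_pos]
          congr 1
          push_cast
          ring
      · by_cases h : i + (pvExt cs step i / step + 1) * step < cs.length
        · simp only [h, if_pos]
          apply ih
          · have h1 : step ≤ (pvExt cs step i / step + 1) * step :=
              Nat.le_mul_of_pos_left step (Nat.succ_pos _)
            omega
          · exact h
        · simp only [h, if_false]
          rw [pvGL]
          simp [h]

-- per step: A's measured compressed length equals B's scan of the extension array
theorem pv_step (cs : List Char) (step : Nat) (h1 : 1 ≤ step) (h2 : 2 * step ≤ cs.length)
    (acc : Int) :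
    (let st := (PySem.List.pyRange ((step : Nat) : Int) ((cs.length : Nat) : Int) ((step : Nat) : Int)).foldl
      (fun (a : List Char × List Char × Int) i =>
        if PySem.List.slice cs (some i) (some (i + ((step : Nat) : Int))) == a.2.1 then
          (a.1, a.2.1, a.2.2 + 1)
        else
          (a.1 ++ (if a.2.2 > 1 then PySem.Int.toChars a.2.2 ++ a.2.1 else a.2.1),
           PySem.List.slice cs (some i) (some (i + ((step : Nat) : Int))), 1))
      (([] : List Char), PySem.List.slice cs none (some ((step : Nat) : Int)), (1 : Int))
     let compressed := st.1 ++ (if st.2.2 > 1 then PySem.Int.toChars st.2.2 ++ st.2.1 else st.2.1)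
     min acc (compressed.length : Int))
    = min acc (pvBScan (pvBuild cs cs.length step) cs.length step h1 0 0) := by
  have hA := pv_A_inner (pvBlocks cs step step) []
    (PySem.List.slice cs none (some ((step : Nat) : Int))) 1
  simp only [pvBlocks, List.foldl_map] at hA
  simp only [List.length_nil, Nat.cast_zero, zero_add] at hA
  dsimp only at hA ⊢
  rw [hA]
  have hPB : ((PySem.List.pyRange ((step : Nat) : Int) ((cs.length : Nat) : Int) ((step : Nat) : Int)).map
      (fun ii => PySem.List.slice cs (some ii) (some (ii + ((step : Nat) : Int)))))
      = pvBlocks cs step step := rfl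
  rw [hPB]
  have hprev : PySem.List.slice cs none (some ((step : Nat) : Int)) = (cs.drop 0).take step := by
    rw [PySem.List.slice_to_natCast]
    simp
  rw [hprev]
  have hAG := pv_A_eq_GL cs step h1 cs.length 0 (by omega) (by omega)
  simp only [Nat.zero_add] at hAG
  rw [hAG]
  rw [pv_scan_eq cs step h1 cs.length 0 0 (by omega)]
  simp

-- ===== VERDICT (by name: the statement is the Claim_ definition above) =====
theorem solution_spec : Claim_equal_solution := by
  intro s _
  unfold Spec_solution solution solution_alt
  simp only [PySem.Str.len_eq]
  have hfd : PySem.Int.floordiv ((s.toList.length : Nat) : Int) 2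
      = ((s.toList.length / 2 : Nat) : Int) := by
    exact_mod_cast PySem.Int.floordiv_natCast s.toList.length 2
  rw [hfd, PySem.List.pyRange_one]
  have htn : ((((s.toList.length / 2 : Nat) : Int) + 1 - 1)).toNat = s.toList.length / 2 := by
    omega
  rw [htn, List.foldl_map]
  apply PySem.List.foldl_congr_mem
  intro acc k hk
  have hk2 : k < s.toList.length / 2 := List.mem_range.mp hk
  have hcast : (1 : Int) + (k : Int) = (((k + 1 : Nat)) : Int) := by push_cast; ring
  rw [hcast]
  exact pv_step s.toList (k + 1) (by omega) (by omega) acc
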